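-- pv_equiv track=rewrite | github.com/JSdoubleL/adventofcode | 2023/day3/gear_ratios.py | process_window
-- ===== SOURCE A (Python) =====
-- from typing import List
--
-- def process_window(cur: str, m: List[bool]) -> int:
--     numbers = []
--     for i, c in enumerate(cur):
--         if c.isdigit() and (i == 0 or not cur[i-1].isdigit()):
--             numbers.append([i, None])
--         if c.isdigit() and (i == len(cur) - 1 or not cur[i+1].isdigit()):
--             numbers[-1][1] = i + 1
--     return sum(int(cur[n[0]:n[1]]) for n in numbers
--                if any(m[max(0, n[0] - 1):min(n[1] + 1, len(cur))]))
-- ===== SOURCE B (Python) =====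
-- from typing import List
--
-- def process_window(cur: str, m: List[bool]) -> int:
--     total = 0
--     value = 0
--     adj = False
--     in_num = False
--     for i, c in enumerate(cur):
--         if c.isdigit():
--             if not in_num:
--                 in_num = True
--                 value = 0
--                 adj = i > 0 and i - 1 < len(m) and m[i - 1]
--             value = value * 10 + int(c)
--             if i < len(m) and m[i]:
--                 adj = True
--         else:
--             if in_num:
--                 if i < len(m) and m[i]:
--                     adj = True
--                 if adj:
--                     total += value
--                 in_num = False
--     if in_num and adj:
--         total += value
--     return total
-- ===== Notes on version B (the rewrite author's own statement) =====
-- stated objective: alternative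
-- what changed: B replaces A's two-phase approach (collect [start,end] spans with lookahead/lookbehind into a list, then slice, int() and sum with a mask-window test per span) by a single streaming pass over enumerate(cur) that maintains a running value (value*10+digit), an adjacency flag updated from the one-cell-padded mask window, and a total, flushing each run as it ends.
import Mathlib
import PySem

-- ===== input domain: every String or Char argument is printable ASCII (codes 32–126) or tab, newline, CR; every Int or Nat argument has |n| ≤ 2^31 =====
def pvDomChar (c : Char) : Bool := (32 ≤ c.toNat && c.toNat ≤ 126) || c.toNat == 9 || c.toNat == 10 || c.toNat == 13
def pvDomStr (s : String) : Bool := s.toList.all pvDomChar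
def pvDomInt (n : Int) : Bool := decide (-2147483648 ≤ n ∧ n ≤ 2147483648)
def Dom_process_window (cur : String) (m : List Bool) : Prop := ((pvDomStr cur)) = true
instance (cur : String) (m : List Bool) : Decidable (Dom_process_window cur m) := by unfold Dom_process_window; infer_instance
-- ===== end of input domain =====

-- B replaces A's collect-spans-then-slice-and-sum with a single streaming pass keeping a running value and adjacency flag (objective: alternative decomposition, same cost).

-- ===== PORT A =====
-- c.isdigit() on one char (exact on the ASCII domain)
def pwDigit (c : Char) : Bool := PySem.Chars.isdigit c

-- cur[j].isdigit() — only evaluated by A at in-range j; out of range we return false (unreachable)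
def pwDigitAt (full : List Char) (j : Nat) : Bool := (full[j]?.map pwDigit).getD false

-- int(s) for a nonempty run of ASCII digits (exact there: no sign/space/underscore can occur in a digit run)
def pwVal (ds : List Char) : Int := ds.foldl (fun a c => a * 10 + ((c.toNat : Int) - 48)) 0

-- numbers[-1][1] = e  (Python mutates the last pair; [] case unreachable, A would raise IndexError)
def pwSetLast : List (Nat × Option Nat) → Nat → List (Nat × Option Nat)
  | [], _ => []
  | [p], e => [(p.1, some e)]
  | x :: y :: xs, e => x :: pwSetLast (y :: xs) e

-- the 'for i, c in enumerate(cur)' loop of A, collecting [start, end] spans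
def pwA_loop (full : List Char) : List Char → Nat → List (Nat × Option Nat) → List (Nat × Option Nat)
  | [], _, nums => nums
  | c :: rest, i, nums =>
    let nums1 := if pwDigit c && (i == 0 || !pwDigitAt full (i - 1)) then nums ++ [(i, (none : Option Nat))] else nums
    let nums2 := if pwDigit c && (i == full.length - 1 || !pwDigitAt full (i + 1)) then pwSetLast nums1 (i + 1) else nums1
    pwA_loop full rest (i + 1) nums2

def process_window (cur : String) (m : List Bool) : Int :=
  let cs := cur.toList
  let numbers := pwA_loop cs cs 0 []
  ((numbers.filter (fun n =>
      ((m.drop (n.1 - 1)).take (min (n.2.getD 0 + 1) cs.length - (n.1 - 1))).any id)).map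
    (fun n => pwVal ((cs.drop n.1).take (n.2.getD 0 - n.1)))).sum

-- ===== PORT B =====
-- streaming state: (total, value, adj, in_num)
def pwB_loop (m : List Bool) : List Char → Nat → Int × Int × Bool × Bool → Int × Int × Bool × Bool
  | [], _, st => st
  | c :: rest, i, (total, value, adj, innum) =>
    if pwDigit c then
      let p : Int × Bool :=
        if !innum then (0, decide (0 < i) && (decide (i - 1 < m.length) && m.getD (i - 1) false)) else (value, adj)
      let value := p.1 * 10 + ((c.toNat : Int) - 48)
      let adj := if decide (i < m.length) && m.getD i false then true else p.2
      pwB_loop m rest (i + 1) (total, value, adj, true)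
    else
      if innum then
        let adj := if decide (i < m.length) && m.getD i false then true else adj
        let total := if adj then total + value else total
        pwB_loop m rest (i + 1) (total, value, adj, false)
      else
        pwB_loop m rest (i + 1) (total, value, adj, innum)

def process_window_alt (cur : String) (m : List Bool) : Int :=
  match pwB_loop m cur.toList 0 (0, 0, false, false) with
  | (total, value, adj, innum) => if innum && adj then total + value else total

-- ===== PRECONDITION & SPEC =====
def Spec_process_window (cur : String) (m : List Bool) (out : Int) : Prop := out = process_window_alt cur m
instance (cur : String) (m : List Bool) (out : Int) : Decidable (Spec_process_window cur m out) := by unfold Spec_process_window; infer_instance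

-- ===== CLAIM (what is proved, stated in full; the proofs are below) =====
def Claim_equal_process_window : Prop := ∀ (cur : String) (m : List Bool), Dom_process_window cur m → Spec_process_window cur m (process_window cur m)

-- ===== LEMMAS AND PROOFS =====

-- proof-side abbreviations for A's final sum
def pwWin (full : List Char) (m : List Bool) (n : Nat × Option Nat) : Bool :=
  ((m.drop (n.1 - 1)).take (min (n.2.getD 0 + 1) full.length - (n.1 - 1))).any id

def pwContrib (full : List Char) (m : List Bool) (n : Nat × Option Nat) : Int :=
  if pwWin full m n then pwVal ((full.drop n.1).take (n.2.getD 0 - n.1)) else 0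

def pwSum (full : List Char) (m : List Bool) (nums : List (Nat × Option Nat)) : Int :=
  (nums.map (pwContrib full m)).sum

def pwFinishB (st : Int × Int × Bool × Bool) : Int :=
  if st.2.2.2 && st.2.2.1 then st.1 + st.2.1 else st.1

lemma pwSum_filter (full : List Char) (m : List Bool) (nums : List (Nat × Option Nat)) :
    ((nums.filter (fun n =>
        ((m.drop (n.1 - 1)).take (min (n.2.getD 0 + 1) full.length - (n.1 - 1))).any id)).map
      (fun n => pwVal ((full.drop n.1).take (n.2.getD 0 - n.1)))).sum = pwSum full m nums := by
  induction nums with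
  | nil => rfl
  | cons x xs ih =>
    by_cases h : pwWin full m x = true <;>
      simp only [pwWin] at h <;>
      simp [pwSum, pwContrib, pwWin, h] at ih ⊢ <;> try omega

lemma pwSum_append (full : List Char) (m : List Bool) (nums : List (Nat × Option Nat)) (n : Nat × Option Nat) :
    pwSum full m (nums ++ [n]) = pwSum full m nums + pwContrib full m n := by
  simp [pwSum]

lemma pwSetLast_append (closed : List (Nat × Option Nat)) (s : Nat) (e? : Option Nat) (v : Nat) :
    pwSetLast (closed ++ [(s, e?)]) v = closed ++ [(s, some v)] := by
  induction closed with
  | nil => rfl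
  | cons x xs ih =>
    cases xs with
    | nil => simp [pwSetLast]
    | cons y ys => simpa [pwSetLast] using ih

-- one-step window extension: any over m[a..a+k) gains m.getD (a+k)
lemma pwAny_take_succ (m : List Bool) (a k : Nat) :
    ((m.drop a).take (k + 1)).any id = (((m.drop a).take k).any id || m.getD (a + k) false) := by
  rw [List.take_add_one, List.any_append]
  congr 1
  rw [List.getElem?_drop]
  cases h : m[a + k]? with
  | none => simp [List.getD_eq_getElem?_getD, h]
  | some b => simp [List.getD_eq_getElem?_getD, h]

lemma pwGuard_getD (m : List Bool) (j : Nat) :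
    (decide (j < m.length) && m.getD j false) = m.getD j false := by
  by_cases h : j < m.length
  · simp [h]
  · simp [h, List.getD_eq_getElem?_getD]

lemma pwVal_take_succ (xs : List Char) (k : Nat) (c : Char) (h : xs[k]? = some c) :
    pwVal (xs.take (k + 1)) = pwVal (xs.take k) * 10 + ((c.toNat : Int) - 48) := by
  rw [pwVal, List.take_add_one, h]
  simp [pwVal]

-- the simulation invariant
def pwInv (full : List Char) (m : List Bool) (i : Nat) (nums : List (Nat × Option Nat))
    (total value : Int) (adj innum : Bool) : Prop :=
  (innum = false ∧ (i = 0 ∨ pwDigitAt full (i - 1) = false) ∧ total = pwSum full m nums)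
  ∨ (innum = true ∧ ∃ s closed,
      nums = closed ++ [(s, if i = full.length ∨ pwDigitAt full i = false then some i else none)] ∧
      s < i ∧ (∀ j, s ≤ j → j < i → pwDigitAt full j = true) ∧
      total = pwSum full m closed ∧
      value = pwVal ((full.drop s).take (i - s)) ∧
      adj = ((m.drop (s - 1)).take (i - (s - 1))).any id)

-- if-then-true is Bool or
lemma pwOrIf (b x : Bool) : (if b = true then true else x) = (b || x) := by cases b <;> simp

-- left window of a freshly opened run at i, after testing m[i-1] (guarded) and m[i]
lemma pwAdjBase (m : List Bool) (i : Nat) :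
    (if (decide (i < m.length) && m.getD i false) = true then true
     else decide (0 < i) && (decide (i - 1 < m.length) && m.getD (i - 1) false))
    = ((m.drop (i - 1)).take ((i + 1) - (i - 1))).any id := by
  rw [pwOrIf, pwGuard_getD]
  cases i with
  | zero =>
    have h := pwAny_take_succ m 0 0
    simp at h
    simp [h]
  | succ j =>
    rw [pwGuard_getD]
    have h2 : (j + 1 + 1) - (j + 1 - 1) = 2 := by omega
    rw [h2]
    have ha := pwAny_take_succ m j 1
    have hb := pwAny_take_succ m j 0
    simp only [Nat.add_zero] at hb
    have h1 : ((m.drop j).take 0).any id = false := by simp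
    rw [h1] at hb; simp only [Bool.false_or] at hb
    show (m.getD (j + 1) false || (decide (0 < j + 1) && m.getD (j + 1 - 1) false))
        = ((m.drop (j + 1 - 1)).take 2).any id
    have h3 : j + 1 - 1 = j := by omega
    rw [h3]
    rw [ha, hb]
    cases m.getD j false <;> cases m.getD (j + 1) false <;> simp

lemma pwMain (full : List Char) (m : List Bool) :
    ∀ (rest : List Char) (i : Nat) (nums : List (Nat × Option Nat)) (total value : Int) (adj innum : Bool),
      full.drop i = rest → i ≤ full.length →
      pwInv full m i nums total value adj innum →
      pwSum full m (pwA_loop full rest i nums) = pwFinishB (pwB_loop m rest i (total, value, adj, innum)) := by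
  intro rest
  induction rest with
  | nil =>
    intro i nums total value adj innum hdrop hile hinv
    have hlen : i = full.length := by
      have := List.drop_eq_nil_iff.mp hdrop
      omega
    rcases hinv with ⟨hn, _, ht⟩ | ⟨hn, s, closed, hshape, hsi, hrun, ht, hv, ha⟩
    · subst hn; simp [pwA_loop, pwB_loop, pwFinishB, ht]
    · subst hn
      rw [if_pos (Or.inl hlen)] at hshape
      subst hshape
      simp only [pwA_loop, pwB_loop, pwFinishB, Bool.true_and]
      rw [pwSum_append]
      simp only [pwContrib, pwWin, Option.getD_some]
      have hmin : min (i + 1) full.length = i := by omega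
      rw [hmin, ht, hv, ha]
      cases h : ((m.drop (s - 1)).take (i - (s - 1))).any id <;> simp
  | cons c rest ih =>
    intro i nums total value adj innum hdrop hile hinv
    have hlt : i < full.length := by
      by_contra h
      have : full.drop i = [] := List.drop_eq_nil_iff.mpr (by omega)
      rw [hdrop] at this; exact (List.cons_ne_nil _ _) this
    have hi1 : i + 1 ≤ full.length := hlt
    have hgi : full[i]? = some c := by
      have h0 : (full.drop i)[(0 : Nat)]? = full[i + 0]? := List.getElem?_drop
      rw [hdrop] at h0
      simpa using h0.symm
    have hdrop' : full.drop (i + 1) = rest := by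
      have h0 := congrArg (List.drop 1) hdrop
      rw [List.drop_drop] at h0
      simpa using h0
    have hdigAt : pwDigitAt full i = pwDigit c := by simp [pwDigitAt, hgi]
    simp only [pwA_loop, pwB_loop]
    by_cases hd : pwDigit c = true
    · -- digit character at i
      rw [if_pos hd]
      by_cases hcb : (i + 1 = full.length ∨ pwDigitAt full (i + 1) = false)
      · -- A closes the run at i
        have hc2 : (pwDigit c && (i == full.length - 1 || !pwDigitAt full (i + 1))) = true := by
          rcases hcb with h | h
          · have : (i == full.length - 1) = true := by simp; omega
            simp [hd, this]
          · simp [hd, h]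
        rcases hinv with ⟨hn, hprev, ht⟩ | ⟨hn, s, closed, hshape, hsi, hrun, ht, hv, ha⟩
        · -- run opens (and closes immediately) at i
          subst hn
          have hc1 : (pwDigit c && (i == 0 || !pwDigitAt full (i - 1))) = true := by
            rcases hprev with h | h
            · simp [hd, h]
            · simp [hd, h]
          rw [if_pos hc2, if_pos hc1, pwSetLast_append]
          refine ih (i + 1) (nums ++ [(i, some (i + 1))]) total
              (0 * 10 + ((c.toNat : Int) - 48))
              (if (decide (i < m.length) && m.getD i false) = true then true
               else decide (0 < i) && (decide (i - 1 < m.length) && m.getD (i - 1) false))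
              true hdrop' hi1 (Or.inr ⟨rfl, i, nums, ?_, by omega, ?_, ht, ?_, ?_⟩)
          · rw [if_pos hcb]
          · intro j h1 h2
            have : j = i := by omega
            rw [this, hdigAt]; exact hd
          · have h1 : (i + 1) - i = 1 := by omega
            rw [h1, hdrop]
            simp [pwVal]
          · rw [pwAdjBase]
        · -- run continues at i, A closes it here
          subst hn
          have hprevdig : pwDigitAt full (i - 1) = true := hrun (i - 1) (by omega) (by omega)
          have hc1 : (pwDigit c && (i == 0 || !pwDigitAt full (i - 1))) = false := by
            rw [hprevdig]
            have : (i == 0) = false := by simp; omega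
            simp [this]
          have hiopen : ¬ (i = full.length ∨ pwDigitAt full i = false) := by
            rw [hdigAt]; simp [hd]; omega
          rw [if_neg hiopen] at hshape
          subst hshape
          rw [if_pos hc2, if_neg (by rw [hc1]; simp), pwSetLast_append]
          refine ih (i + 1) (closed ++ [(s, some (i + 1))]) total
              (value * 10 + ((c.toNat : Int) - 48))
              (if (decide (i < m.length) && m.getD i false) = true then true else adj)
              true hdrop' hi1 (Or.inr ⟨rfl, s, closed, ?_, by omega, ?_, ht, ?_, ?_⟩)
          · rw [if_pos hcb]
          · intro j h1 h2
            by_cases hji : j = i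
            · rw [hji, hdigAt]; exact hd
            · exact hrun j h1 (by omega)
          · have hk : (full.drop s)[i - s]? = some c := by
              have h0 : (full.drop s)[i - s]? = full[s + (i - s)]? := List.getElem?_drop
              have h1 : s + (i - s) = i := by omega
              rw [h0, h1]; exact hgi
            have h1 : (i + 1) - s = (i - s) + 1 := by omega
            rw [h1, pwVal_take_succ _ _ _ hk, hv]
          · rw [pwOrIf, pwGuard_getD, ha]
            have h1 : (i + 1) - (s - 1) = (i - (s - 1)) + 1 := by omega
            rw [h1, pwAny_take_succ]
            have h2 : (s - 1) + (i - (s - 1)) = i := by omega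
            rw [h2]
            cases ((m.drop (s - 1)).take (i - (s - 1))).any id <;> simp
      · -- digit, run stays open past i
        have hnl : i + 1 ≠ full.length := fun h => hcb (Or.inl h)
        have hnd : pwDigitAt full (i + 1) = true := by
          cases h : pwDigitAt full (i + 1)
          · exact absurd (Or.inr h) hcb
          · rfl
        have hc2 : (pwDigit c && (i == full.length - 1 || !pwDigitAt full (i + 1))) = false := by
          have h1 : (i == full.length - 1) = false := by simp; omega
          rw [hnd, h1]; simp
        rcases hinv with ⟨hn, hprev, ht⟩ | ⟨hn, s, closed, hshape, hsi, hrun, ht, hv, ha⟩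
        · subst hn
          have hc1 : (pwDigit c && (i == 0 || !pwDigitAt full (i - 1))) = true := by
            rcases hprev with h | h
            · simp [hd, h]
            · simp [hd, h]
          rw [if_neg (by rw [hc2]; simp), if_pos hc1]
          refine ih (i + 1) (nums ++ [(i, none)]) total
              (0 * 10 + ((c.toNat : Int) - 48))
              (if (decide (i < m.length) && m.getD i false) = true then true
               else decide (0 < i) && (decide (i - 1 < m.length) && m.getD (i - 1) false))
              true hdrop' hi1 (Or.inr ⟨rfl, i, nums, ?_, by omega, ?_, ht, ?_, ?_⟩)
          · rw [if_neg hcb]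
          · intro j h1 h2
            have : j = i := by omega
            rw [this, hdigAt]; exact hd
          · have h1 : (i + 1) - i = 1 := by omega
            rw [h1, hdrop]
            simp [pwVal]
          · rw [pwAdjBase]
        · subst hn
          have hprevdig : pwDigitAt full (i - 1) = true := hrun (i - 1) (by omega) (by omega)
          have hc1 : (pwDigit c && (i == 0 || !pwDigitAt full (i - 1))) = false := by
            rw [hprevdig]
            have : (i == 0) = false := by simp; omega
            simp [this]
          have hiopen : ¬ (i = full.length ∨ pwDigitAt full i = false) := by
            rw [hdigAt]; simp [hd]; omega
          rw [if_neg hiopen] at hshape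
          subst hshape
          rw [if_neg (by rw [hc2]; simp), if_neg (by rw [hc1]; simp)]
          refine ih (i + 1) (closed ++ [(s, none)]) total
              (value * 10 + ((c.toNat : Int) - 48))
              (if (decide (i < m.length) && m.getD i false) = true then true else adj)
              true hdrop' hi1 (Or.inr ⟨rfl, s, closed, ?_, by omega, ?_, ht, ?_, ?_⟩)
          · rw [if_neg hcb]
          · intro j h1 h2
            by_cases hji : j = i
            · rw [hji, hdigAt]; exact hd
            · exact hrun j h1 (by omega)
          · have hk : (full.drop s)[i - s]? = some c := by
              have h0 : (full.drop s)[i - s]? = full[s + (i - s)]? := List.getElem?_drop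
              have h1 : s + (i - s) = i := by omega
              rw [h0, h1]; exact hgi
            have h1 : (i + 1) - s = (i - s) + 1 := by omega
            rw [h1, pwVal_take_succ _ _ _ hk, hv]
          · rw [pwOrIf, pwGuard_getD, ha]
            have h1 : (i + 1) - (s - 1) = (i - (s - 1)) + 1 := by omega
            rw [h1, pwAny_take_succ]
            have h2 : (s - 1) + (i - (s - 1)) = i := by omega
            rw [h2]
            cases ((m.drop (s - 1)).take (i - (s - 1))).any id <;> simp
    · -- non-digit character at i
      rw [Bool.not_eq_true] at hd
      rw [if_neg (by simp [hd]), if_neg (by simp [hd]), if_neg (by simp [hd])]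
      rcases hinv with ⟨hn, hprev, ht⟩ | ⟨hn, s, closed, hshape, hsi, hrun, ht, hv, ha⟩
      · subst hn
        exact ih (i + 1) nums total value adj false hdrop' hi1
          (Or.inl ⟨rfl, Or.inr (by simpa [hdigAt] using hd), ht⟩)
      · subst hn
        have hiclosed : (i = full.length ∨ pwDigitAt full i = false) := Or.inr (by rw [hdigAt]; exact hd)
        rw [if_pos hiclosed] at hshape
        subst hshape
        refine ih (i + 1) (closed ++ [(s, some i)])
            (if (if (decide (i < m.length) && m.getD i false) = true then true else adj) = true
              then total + value else total)
            value
            (if (decide (i < m.length) && m.getD i false) = true then true else adj)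
            false hdrop' hi1 (Or.inl ⟨rfl, Or.inr (by simpa [hdigAt] using hd), ?_⟩)
        rw [pwSum_append, ht, hv]
        simp only [pwContrib, pwWin, Option.getD_some]
        have hmin : min (i + 1) full.length = i + 1 := by omega
        rw [hmin, ha, pwOrIf, pwGuard_getD]
        have h1 : (i + 1) - (s - 1) = (i - (s - 1)) + 1 := by omega
        rw [h1, pwAny_take_succ]
        have h2 : (s - 1) + (i - (s - 1)) = i := by omega
        rw [h2]
        cases ((m.drop (s - 1)).take (i - (s - 1))).any id <;> cases m.getD i false <;> simp

-- ===== VERDICT (by name: the statement is the Claim_ definition above) =====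
theorem process_window_spec : Claim_equal_process_window := by
  intro cur m _
  unfold Spec_process_window process_window process_window_alt
  dsimp only
  rw [pwSum_filter]
  have h := pwMain cur.toList m cur.toList 0 [] 0 0 false false (by simp) (by simp)
    (Or.inl ⟨rfl, Or.inl rfl, rfl⟩)
  rw [h]
  rcases hb : pwB_loop m cur.toList 0 (0, 0, false, false) with ⟨t, v, a, n⟩
  simp [pwFinishB]
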